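-- pv_equiv track=rewrite | github.com/denoseu/Tucil1_13522013 | src/GUI.py | all_sequences
-- ===== SOURCE A (Python) =====
-- def all_sequences(matrix, buffer_size):
--     def is_valid_move(row, col):
--         return 0 <= row < len(matrix) and 0 <= col < len(matrix[0]) and (row, col) not in visited
--
--     def explore(row, col, buffer_index, is_vertical):
--         visited.add((row, col))
--         current_token.append(matrix[row][col])
--         current_coordinate.append((col+1, row+1))
--         if buffer_index == buffer_size - 1:
--             coordinates.append(current_coordinate[:])
--             sequences.append(current_token[:])
--         else:
--             directions = [(1, 0), (-1, 0)] if is_vertical else [(0, 1), (0, -1)]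
--             for dr, dc in directions:
--                 new_row, new_col = row, col
--                 for _ in range(buffer_size - buffer_index):
--                     new_row, new_col = new_row + dr, new_col + dc
--                     if is_valid_move(new_row, new_col):
--                         explore(new_row, new_col, buffer_index + 1, not is_vertical)
--
--         visited.remove((row, col))
--         current_token.pop()
--         current_coordinate.pop()
--
--     sequences = []
--     coordinates = []
--     current_coordinate = []
--     current_token = []
--     visited = set()
--     for col_index in range(len(matrix[0])):
--         explore(0, col_index, 0, True)
--     return sequences, coordinates
-- ===== SOURCE B (Python) =====
-- def all_sequences(matrix, buffer_size):
--     rows, cols = len(matrix), len(matrix[0])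
--     if buffer_size < 1:
--         return [], []
--     frontier = [([matrix[0][c]], [(c + 1, 1)], {(0, c)}, 0, c) for c in range(cols)]
--     for bi in range(buffer_size - 1):
--         dirs = [(1, 0), (-1, 0)] if bi % 2 == 0 else [(0, 1), (0, -1)]
--         new_frontier = []
--         for toks, coords, vis, r, c in frontier:
--             for dr, dc in dirs:
--                 for k in range(1, buffer_size - bi + 1):
--                     nr, nc = r + dr * k, c + dc * k
--                     if 0 <= nr < rows and 0 <= nc < cols and (nr, nc) not in vis:
--                         new_frontier.append((toks + [matrix[nr][nc]],
--                                              coords + [(nc + 1, nr + 1)],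
--                                              vis | {(nr, nc)}, nr, nc))
--         frontier = new_frontier
--     return [t for t, _, _, _, _ in frontier], [c for _, c, _, _, _ in frontier]
-- ===== Notes on version B (the rewrite author's own statement) =====
-- stated objective: alternative
-- what changed: The recursive backtracking DFS with shared mutable state (visited set, current path, undo on return) is replaced by an iterative level-by-level frontier expansion: all partial paths of length k are expanded in order to length k+1 via a flatMap step, which yields exactly the DFS pre-order of completed paths without recursion or undo.
import Mathlib
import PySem

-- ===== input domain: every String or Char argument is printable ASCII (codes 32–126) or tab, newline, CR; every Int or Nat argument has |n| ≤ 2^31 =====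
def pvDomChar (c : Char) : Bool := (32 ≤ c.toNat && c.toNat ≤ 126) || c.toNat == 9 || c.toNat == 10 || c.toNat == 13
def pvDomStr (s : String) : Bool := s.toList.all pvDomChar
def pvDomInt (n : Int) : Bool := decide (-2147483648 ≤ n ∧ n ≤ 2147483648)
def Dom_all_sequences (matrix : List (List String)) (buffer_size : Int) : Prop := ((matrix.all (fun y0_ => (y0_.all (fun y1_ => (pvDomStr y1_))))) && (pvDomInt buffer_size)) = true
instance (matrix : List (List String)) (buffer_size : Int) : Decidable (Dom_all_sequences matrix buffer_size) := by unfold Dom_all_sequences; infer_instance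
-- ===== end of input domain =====

-- B replaces A's recursive backtracking (mutable visited/path, undo on return) by an
-- iterative level-by-level frontier expansion (alternative decomposition, same cost).
-- A mutates no argument; the equivalence is about the return value.

-- shared indexing helpers (both Pythons read len(matrix), len(matrix[0]), matrix[r][c] identically)
-- len(matrix[0]) — exact when matrix ≠ [] (Pre_)
def pvCols (matrix : List (List String)) : Int := ((PySem.List.pyGet? matrix 0).getD []).length
-- matrix[r][c] — only evaluated at indices both programs have validated (Pre_ keeps rows long enough)
def pvCell (matrix : List (List String)) (r c : Int) : String :=
  PySem.List.pyGetD (PySem.List.pyGetD matrix r []) c ""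
-- 0 <= r < len(matrix) and 0 <= c < len(matrix[0]) and (r,c) not in visited
def pvValid (matrix : List (List String)) (visited : PySem.Set (Int × Int)) (r c : Int) : Bool :=
  decide (0 ≤ r) && decide (r < (matrix.length : Int)) && decide (0 ≤ c) &&
    decide (c < pvCols matrix) && !(PySem.Set.contains visited (r, c))

-- ===== PORT A =====
-- A's `explore`: the mutable visited/current_token/current_coordinate are threaded as arguments
-- (their final pop/remove only restores the caller's state, so it has no ported effect);
-- `sequences, coordinates` is the accumulator pair `acc`.
def pvExploreA (matrix : List (List String)) (bs : Int) (row col bi : Int) (vert : Bool)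
    (visited : PySem.Set (Int × Int)) (curTok : List String) (curCoord : List (Int × Int))
    (acc : List (List String) × List (List (Int × Int))) :
    List (List String) × List (List (Int × Int)) :=
  let visited' := PySem.Set.add visited (row, col)
  let curTok' := curTok ++ [pvCell matrix row col]
  let curCoord' := curCoord ++ [(col + 1, row + 1)]
  if bi = bs - 1 then
    (acc.1 ++ [curTok'], acc.2 ++ [curCoord'])
  else
    (if vert then [((1 : Int), (0 : Int)), (-1, 0)] else [(0, 1), (0, -1)]).foldl
      (fun a d =>
        ((PySem.List.pyRange 0 (bs - bi) 1).foldl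
          (fun (s : (Int × Int) × (List (List String) × List (List (Int × Int)))) _ =>
            ((s.1.1 + d.1, s.1.2 + d.2),
              if pvValid matrix visited' (s.1.1 + d.1) (s.1.2 + d.2) then
                (if _h : bi < bs then
                  -- the dite is a totality guard only: the loop body runs only when bs - bi > 0
                  pvExploreA matrix bs (s.1.1 + d.1) (s.1.2 + d.2) (bi + 1) (!vert)
                    visited' curTok' curCoord' s.2
                 else s.2)
              else s.2))
          ((row, col), a)).2)
      acc
termination_by (bs - bi).toNat
decreasing_by omega

def all_sequences (matrix : List (List String)) (buffer_size : Int) :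
    List (List String) × (List (List (Int × Int))) :=
  (PySem.List.pyRange 0 (pvCols matrix) 1).foldl
    (fun acc c => pvExploreA matrix buffer_size 0 c 0 true PySem.Set.empty [] [] acc)
    ([], [])

-- ===== PORT B =====
-- a frontier entry: (tokens, coordinates, visited, row, col)
abbrev PvE := List String × List (Int × Int) × PySem.Set (Int × Int) × Int × Int

def pvDirs (bi : Int) : List (Int × Int) :=
  if PySem.Int.mod bi 2 = 0 then [(1, 0), (-1, 0)] else [(0, 1), (0, -1)]

def pvChild (matrix : List (List String)) (e : PvE) (nr nc : Int) : PvE :=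
  (e.1 ++ [pvCell matrix nr nc], e.2.1 ++ [(nc + 1, nr + 1)],
   PySem.Set.union e.2.2.1 [(nr, nc)], nr, nc)

-- the two inner loops of B's expansion of one frontier entry
def pvExpandEntry (matrix : List (List String)) (bs bi : Int) (nf : List PvE) (e : PvE) : List PvE :=
  (pvDirs bi).foldl (fun nf d =>
    (PySem.List.pyRange 1 (bs - bi + 1) 1).foldl (fun nf k =>
      if pvValid matrix e.2.2.1 (e.2.2.2.1 + d.1 * k) (e.2.2.2.2 + d.2 * k) then
        nf ++ [pvChild matrix e (e.2.2.2.1 + d.1 * k) (e.2.2.2.2 + d.2 * k)]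
      else nf) nf) nf

def pvStep (matrix : List (List String)) (bs bi : Int) (frontier : List PvE) : List PvE :=
  frontier.foldl (pvExpandEntry matrix bs bi) []

def pvInit (matrix : List (List String)) : List PvE :=
  (PySem.List.pyRange 0 (pvCols matrix) 1).map (fun c =>
    ([pvCell matrix 0 c], [(c + 1, 1)], PySem.Set.ofList [(0, c)], 0, c))

def all_sequences_alt (matrix : List (List String)) (buffer_size : Int) :
    List (List String) × (List (List (Int × Int))) :=
  if buffer_size < 1 then ([], [])
  else
    let final := (PySem.List.pyRange 0 (buffer_size - 1) 1).foldl
      (fun frontier bi => pvStep matrix buffer_size bi frontier) (pvInit matrix)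
    (final.map (·.1), final.map (·.2.1))

-- ===== PRECONDITION & SPEC =====
-- Pre_ excludes the empty matrix (len(matrix[0]) raises IndexError) and, when buffer_size > 1,
-- matrices with a row shorter than row 0 (matrix[row][col] can raise IndexError there); this is
-- slightly conservative: a too-short row that no path reaches leaves A returning (see cites).
def Pre_all_sequences (matrix : List (List String)) (buffer_size : Int) : Prop :=
  matrix ≠ [] ∧ (1 < buffer_size → ∀ row ∈ matrix, (matrix.headD []).length ≤ row.length)
instance (matrix : List (List String)) (buffer_size : Int) : Decidable (Pre_all_sequences matrix buffer_size) := by unfold Pre_all_sequences; infer_instance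

def pvWitness_all_sequences : List (List String) × Int := ([["a", "b"], ["c", "d"]], 2)

def Spec_all_sequences (matrix : List (List String)) (buffer_size : Int) (out : List (List String) × (List (List (Int × Int)))) : Prop := out = all_sequences_alt matrix buffer_size
instance (matrix : List (List String)) (buffer_size : Int) (out : List (List String) × (List (List (Int × Int)))) : Decidable (Spec_all_sequences matrix buffer_size out) := by unfold Spec_all_sequences; infer_instance

-- ===== CLAIM (what is proved, stated in full; the proofs are below) =====
def Claim_equal_all_sequences : Prop := ∀ (matrix : List (List String)) (buffer_size : Int), Dom_all_sequences matrix buffer_size → Pre_all_sequences matrix buffer_size → Spec_all_sequences matrix buffer_size (all_sequences matrix buffer_size)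

-- ===== LEMMAS AND PROOFS =====

-- run the frontier expansion n more levels, the frontier being at level bi
def pvRun (matrix : List (List String)) (bs : Int) : Nat → Int → List PvE → List PvE
  | 0, _, f => f
  | n + 1, bi, f => pvRun matrix bs n (bi + 1) (pvStep matrix bs bi f)

-- the children of one entry, as a flatMap (closed form of pvExpandEntry from [])
def pvChildren (matrix : List (List String)) (bs bi : Int) (e : PvE) : List PvE :=
  (pvDirs bi).flatMap (fun d =>
    ((PySem.List.pyRange 1 (bs - bi + 1) 1).filter
        (fun k => pvValid matrix e.2.2.1 (e.2.2.2.1 + d.1 * k) (e.2.2.2.2 + d.2 * k))).map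
      (fun k => pvChild matrix e (e.2.2.2.1 + d.1 * k) (e.2.2.2.2 + d.2 * k)))

theorem pvExpandEntry_eq (matrix : List (List String)) (bs bi : Int) (nf : List PvE) (e : PvE) :
    pvExpandEntry matrix bs bi nf e = nf ++ pvChildren matrix bs bi e := by
  simp only [pvExpandEntry, pvChildren, PySem.List.foldl_append_if,
    PySem.List.foldl_append_eq_flatMap]

theorem pvStep_eq (matrix : List (List String)) (bs bi : Int) (f : List PvE) :
    pvStep matrix bs bi f = f.flatMap (pvChildren matrix bs bi) := by
  have h : pvExpandEntry matrix bs bi = fun nf e => nf ++ pvChildren matrix bs bi e :=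
    funext fun nf => funext fun e => pvExpandEntry_eq matrix bs bi nf e
  simp only [pvStep, h, PySem.List.foldl_append_eq_flatMap, List.nil_append]

theorem pvRun_nil (matrix : List (List String)) (bs : Int) (n : Nat) (bi : Int) :
    pvRun matrix bs n bi [] = [] := by
  induction n generalizing bi with
  | zero => rfl
  | succ n ih => simp [pvRun, pvStep, ih]

theorem pvRun_append (matrix : List (List String)) (bs : Int) (n : Nat) (bi : Int)
    (f g : List PvE) :
    pvRun matrix bs n bi (f ++ g) = pvRun matrix bs n bi f ++ pvRun matrix bs n bi g := by
  induction n generalizing bi f g with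
  | zero => rfl
  | succ n ih => simp [pvRun, pvStep_eq, ih]

theorem pvRun_flatMap (matrix : List (List String)) (bs : Int) (n : Nat) (bi : Int)
    (l : List Int) (h : Int → List PvE) :
    pvRun matrix bs n bi (l.flatMap h) = l.flatMap (fun c => pvRun matrix bs n bi (h c)) := by
  induction l with
  | nil => simp [pvRun_nil]
  | cons x xs ih => simp [List.flatMap_cons, pvRun_append, ih]

theorem pvParity_flip (bi : Int) :
    decide (PySem.Int.mod (bi + 1) 2 = 0) = !decide (PySem.Int.mod bi 2 = 0) := by
  have h2 : (0 : Int) < 2 := by norm_num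
  simp only [PySem.Int.mod_eq_emod_of_pos h2]
  by_cases h : bi % 2 = 0
  · have h' : (bi + 1) % 2 ≠ 0 := by omega
    simp [h, h']
  · have h' : (bi + 1) % 2 = 0 := by omega
    simp [h, h']

theorem pvDirs_of_parity (bi : Int) (vert : Bool)
    (hv : vert = decide (PySem.Int.mod bi 2 = 0)) :
    (if vert then [((1 : Int), (0 : Int)), (-1, 0)] else [(0, 1), (0, -1)]) = pvDirs bi := by
  subst hv
  by_cases h : PySem.Int.mod bi 2 = 0 <;> simp [pvDirs]

-- the entry A's explore(row, col, bi, …) pushes: path state after appending the current cell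
def pvEntry (matrix : List (List String)) (vis : PySem.Set (Int × Int))
    (toks : List String) (coords : List (Int × Int)) (row col : Int) : PvE :=
  (toks ++ [pvCell matrix row col], coords ++ [(col + 1, row + 1)],
   PySem.Set.add vis (row, col), row, col)

theorem pvChild_eq_pvEntry (matrix : List (List String)) (e : PvE) (nr nc : Int) :
    pvChild matrix e nr nc = pvEntry matrix e.2.2.1 e.1 e.2.1 nr nc := rfl


-- one direction's step loop of A's explore, against B's filtered-range children (hIH is the
-- outer induction hypothesis for the recursive explore calls at level bi+1)
theorem pvDirFold (matrix : List (List String)) (bs : Int) (m : Nat) (bi : Int) (vert : Bool)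
    (vis' : PySem.Set (Int × Int)) (toks' : List String) (coords' : List (Int × Int))
    (row col : Int)
    (hlt : bi < bs)
    (hIH : ∀ (r c : Int) (a : List (List String) × List (List (Int × Int))),
      pvExploreA matrix bs r c (bi + 1) (!vert) vis' toks' coords' a =
        (a.1 ++ (pvRun matrix bs m (bi + 1) [pvEntry matrix vis' toks' coords' r c]).map (·.1),
         a.2 ++ (pvRun matrix bs m (bi + 1) [pvEntry matrix vis' toks' coords' r c]).map (·.2.1)))
    (d : Int × Int) :
    ∀ (t : Nat) (a : List (List String) × List (List (Int × Int))),
      ((PySem.List.pyRange 0 (t : Int) 1).foldl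
        (fun (s : (Int × Int) × (List (List String) × List (List (Int × Int)))) _ =>
          ((s.1.1 + d.1, s.1.2 + d.2),
            if pvValid matrix vis' (s.1.1 + d.1) (s.1.2 + d.2) then
              (if _h : bi < bs then
                pvExploreA matrix bs (s.1.1 + d.1) (s.1.2 + d.2) (bi + 1) (!vert)
                  vis' toks' coords' s.2
               else s.2)
            else s.2))
        ((row, col), a)) =
      ((row + d.1 * t, col + d.2 * t),
        (a.1 ++ (pvRun matrix bs m (bi + 1)
            (((PySem.List.pyRange 1 ((t : Int) + 1) 1).filter
                (fun k => pvValid matrix vis' (row + d.1 * k) (col + d.2 * k))).map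
              (fun k => pvEntry matrix vis' toks' coords' (row + d.1 * k) (col + d.2 * k)))).map (·.1),
         a.2 ++ (pvRun matrix bs m (bi + 1)
            (((PySem.List.pyRange 1 ((t : Int) + 1) 1).filter
                (fun k => pvValid matrix vis' (row + d.1 * k) (col + d.2 * k))).map
              (fun k => pvEntry matrix vis' toks' coords' (row + d.1 * k) (col + d.2 * k)))).map (·.2.1))) := by
  intro t
  induction t with
  | zero =>
    intro a
    have h0 : PySem.List.pyRange 0 ((0 : Nat) : Int) 1 = [] :=
      PySem.List.pyRange_one_eq_nil (by omega)
    have h1 : PySem.List.pyRange 1 (((0 : Nat) : Int) + 1) 1 = [] :=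
      PySem.List.pyRange_one_eq_nil (by omega)
    rw [h0, h1]
    simp [pvRun_nil]
  | succ t iht =>
    intro a
    have hr : PySem.List.pyRange 0 ((t + 1 : Nat) : Int) 1 =
        PySem.List.pyRange 0 (t : Int) 1 ++ [(t : Int)] := by
      push_cast
      exact PySem.List.pyRange_one_succ_right (by omega)
    rw [hr, List.foldl_append, iht a, List.foldl_cons, List.foldl_nil]
    have hB : PySem.List.pyRange 1 (((t + 1 : Nat) : Int) + 1) 1 =
        PySem.List.pyRange 1 ((t : Int) + 1) 1 ++ [(t : Int) + 1] := by
      push_cast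
      exact PySem.List.pyRange_one_succ_right (by omega)
    rw [hB, List.filter_append, List.map_append]
    have e1 : row + d.1 * (t : Int) + d.1 = row + d.1 * ((t : Int) + 1) := by ring
    have e2 : col + d.2 * (t : Int) + d.2 = col + d.2 * ((t : Int) + 1) := by ring
    rw [e1, e2]
    have ecast : ((t + 1 : Nat) : Int) = (t : Int) + 1 := by push_cast; ring
    rw [ecast]
    by_cases hval : pvValid matrix vis' (row + d.1 * ((t : Int) + 1)) (col + d.2 * ((t : Int) + 1)) = true
    · simp only [hval, if_true, dif_pos hlt, hIH, List.filter_cons, List.filter_nil,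
        List.map_cons, List.map_nil, pvRun_append, List.map_append, List.append_assoc]
    · simp only [Bool.not_eq_true] at hval
      simp only [hval, Bool.false_eq_true, if_false, List.filter_cons, List.filter_nil,
        List.map_nil, List.append_nil]

-- main A-side characterisation: explore appends the finished paths of running the frontier
-- [its own entry] the remaining n levels
theorem pvExploreA_eq (matrix : List (List String)) (bs : Int) :
    ∀ (n : Nat) (bi row col : Int) (vert : Bool) (vis : PySem.Set (Int × Int))
      (toks : List String) (coords : List (Int × Int))
      (acc : List (List String) × List (List (Int × Int))),
      bi = bs - 1 - (n : Int) →
      vert = decide (PySem.Int.mod bi 2 = 0) →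
      pvExploreA matrix bs row col bi vert vis toks coords acc =
        (acc.1 ++ (pvRun matrix bs n bi [pvEntry matrix vis toks coords row col]).map (·.1),
         acc.2 ++ (pvRun matrix bs n bi [pvEntry matrix vis toks coords row col]).map (·.2.1)) := by
  intro n
  induction n with
  | zero =>
    intro bi row col vert vis toks coords acc hbi hv
    have hbi' : bi = bs - 1 := by push_cast at hbi; omega
    rw [pvExploreA, if_pos hbi']
    simp [pvRun, pvEntry]
  | succ m ih =>
    intro bi row col vert vis toks coords acc hbi hv
    have hne : ¬(bi = bs - 1) := by push_cast at hbi; omega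
    have hlt : bi < bs := by push_cast at hbi; omega
    have hbi1 : bi + 1 = bs - 1 - (m : Int) := by push_cast at hbi ⊢; omega
    have hv1 : (!vert) = decide (PySem.Int.mod (bi + 1) 2 = 0) := by
      rw [pvParity_flip, hv]
    have hIH : ∀ (r c : Int) (a : List (List String) × List (List (Int × Int))),
        pvExploreA matrix bs r c (bi + 1) (!vert)
            (PySem.Set.add vis (row, col)) (toks ++ [pvCell matrix row col])
            (coords ++ [(col + 1, row + 1)]) a =
          (a.1 ++ (pvRun matrix bs m (bi + 1)
              [pvEntry matrix (PySem.Set.add vis (row, col)) (toks ++ [pvCell matrix row col])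
                (coords ++ [(col + 1, row + 1)]) r c]).map (·.1),
           a.2 ++ (pvRun matrix bs m (bi + 1)
              [pvEntry matrix (PySem.Set.add vis (row, col)) (toks ++ [pvCell matrix row col])
                (coords ++ [(col + 1, row + 1)]) r c]).map (·.2.1)) := by
      intro r c a
      exact ih (bi + 1) r c (!vert) _ _ _ a hbi1 hv1
    have hcnt : ((m + 2 : Nat) : Int) = bs - bi := by push_cast at hbi ⊢; omega
    have hrun : pvRun matrix bs (m + 1) bi [pvEntry matrix vis toks coords row col] =
        pvRun matrix bs m (bi + 1)
          (pvChildren matrix bs bi (pvEntry matrix vis toks coords row col)) := by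
      simp [pvRun, pvStep_eq]
    rw [pvExploreA, if_neg hne]
    simp only [pvDirs_of_parity bi vert hv]
    rw [hrun]
    -- expand the two directions
    have hflat : pvChildren matrix bs bi (pvEntry matrix vis toks coords row col) =
        (pvDirs bi).flatMap (fun d =>
          ((PySem.List.pyRange 1 (bs - bi + 1) 1).filter
              (fun k => pvValid matrix (PySem.Set.add vis (row, col))
                (row + d.1 * k) (col + d.2 * k))).map
            (fun k => pvEntry matrix (PySem.Set.add vis (row, col))
              (toks ++ [pvCell matrix row col]) (coords ++ [(col + 1, row + 1)])
              (row + d.1 * k) (col + d.2 * k))) := by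
      simp only [pvChildren, pvChild_eq_pvEntry]
      rfl
    rw [hflat]
    have hdir := fun (d : Int × Int) => pvDirFold matrix bs m bi vert
      (PySem.Set.add vis (row, col)) (toks ++ [pvCell matrix row col])
      (coords ++ [(col + 1, row + 1)]) row col hlt hIH d (m + 2)
    rw [hcnt] at hdir
    -- the generic direction list fold
    generalize hds : pvDirs bi = ds
    have hds2 : ∀ (dl : List (Int × Int)) (a : List (List String) × List (List (Int × Int))),
        dl.foldl (fun a d =>
          ((PySem.List.pyRange 0 (bs - bi) 1).foldl
            (fun (s : (Int × Int) × (List (List String) × List (List (Int × Int)))) _ =>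
              ((s.1.1 + d.1, s.1.2 + d.2),
                if pvValid matrix (PySem.Set.add vis (row, col)) (s.1.1 + d.1) (s.1.2 + d.2) then
                  (if _h : bi < bs then
                    pvExploreA matrix bs (s.1.1 + d.1) (s.1.2 + d.2) (bi + 1) (!vert)
                      (PySem.Set.add vis (row, col)) (toks ++ [pvCell matrix row col])
                      (coords ++ [(col + 1, row + 1)]) s.2
                   else s.2)
                else s.2))
            ((row, col), a)).2) a =
        (a.1 ++ (pvRun matrix bs m (bi + 1)
            (dl.flatMap (fun d =>
              ((PySem.List.pyRange 1 (bs - bi + 1) 1).filter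
                  (fun k => pvValid matrix (PySem.Set.add vis (row, col))
                    (row + d.1 * k) (col + d.2 * k))).map
                (fun k => pvEntry matrix (PySem.Set.add vis (row, col))
                  (toks ++ [pvCell matrix row col]) (coords ++ [(col + 1, row + 1)])
                  (row + d.1 * k) (col + d.2 * k))))).map (·.1),
         a.2 ++ (pvRun matrix bs m (bi + 1)
            (dl.flatMap (fun d =>
              ((PySem.List.pyRange 1 (bs - bi + 1) 1).filter
                  (fun k => pvValid matrix (PySem.Set.add vis (row, col))
                    (row + d.1 * k) (col + d.2 * k))).map
                (fun k => pvEntry matrix (PySem.Set.add vis (row, col))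
                  (toks ++ [pvCell matrix row col]) (coords ++ [(col + 1, row + 1)])
                  (row + d.1 * k) (col + d.2 * k))))).map (·.2.1)) := by
      intro dl
      induction dl with
      | nil => intro a; simp [pvRun_nil]
      | cons d dl ihd =>
        intro a
        rw [List.foldl_cons, hdir d a, ihd, List.flatMap_cons, pvRun_append]
        simp [List.append_assoc]
    exact hds2 ds acc

theorem pvRunB_eq (matrix : List (List String)) (bs : Int) :
    ∀ (t : Nat) (a : Int) (f : List PvE),
      (PySem.List.pyRange a (a + (t : Int)) 1).foldl
        (fun frontier bi => pvStep matrix bs bi frontier) f = pvRun matrix bs t a f := by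
  intro t
  induction t with
  | zero =>
    intro a f
    rw [PySem.List.pyRange_one_eq_nil (by omega : a + ((0 : Nat) : Int) ≤ a)]
    rfl
  | succ t ih =>
    intro a f
    rw [PySem.List.pyRange_one_cons (by push_cast; omega : a < a + ((t + 1 : Nat) : Int))]
    have : a + ((t + 1 : Nat) : Int) = (a + 1) + (t : Int) := by push_cast; ring
    rw [List.foldl_cons, this, ih]
    rfl

-- explore with bs < 1 never emits anything (its step loops are empty)
theorem pvExploreA_trivial (matrix : List (List String)) (bs : Int) (hbs : bs < 1)
    (col : Int) (acc : List (List String) × List (List (Int × Int))) :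
    pvExploreA matrix bs 0 col 0 true PySem.Set.empty [] [] acc = acc := by
  rw [pvExploreA]
  have h1 : ¬((0 : Int) = bs - 1) := by omega
  have h2 : PySem.List.pyRange 0 bs 1 = [] := PySem.List.pyRange_one_eq_nil (by omega)
  simp [h1, h2]

theorem pv_main (matrix : List (List String)) (bs : Int) :
    all_sequences matrix bs = all_sequences_alt matrix bs := by
  by_cases hbs : bs < 1
  · unfold all_sequences all_sequences_alt
    rw [if_pos hbs]
    rw [PySem.List.foldl_congr_mem (g := fun acc _ => acc)
      (h := by intro acc c _; exact pvExploreA_trivial matrix bs hbs c acc)]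
    exact PySem.List.foldl_ignore _ _
  · have hn : (((bs - 1).toNat : Nat) : Int) = bs - 1 := by omega
    have hA : ∀ (acc : List (List String) × List (List (Int × Int))) (c : Int),
        pvExploreA matrix bs 0 c 0 true PySem.Set.empty [] [] acc =
          (acc.1 ++ (pvRun matrix bs (bs - 1).toNat 0
              [(([pvCell matrix 0 c], [(c + 1, 1)], PySem.Set.ofList [(0, c)], 0, c) : PvE)]).map (·.1),
           acc.2 ++ (pvRun matrix bs (bs - 1).toNat 0
              [(([pvCell matrix 0 c], [(c + 1, 1)], PySem.Set.ofList [(0, c)], 0, c) : PvE)]).map (·.2.1)) := by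
      intro acc c
      have hent : pvEntry matrix PySem.Set.empty [] [] 0 c =
          (([pvCell matrix 0 c], [(c + 1, 1)], PySem.Set.ofList [(0, c)], 0, c) : PvE) := by
        norm_num [pvEntry]
        rfl
      have := pvExploreA_eq matrix bs (bs - 1).toNat 0 0 c true PySem.Set.empty [] [] acc
        (by omega) (by decide)
      rw [hent] at this
      exact this
    unfold all_sequences all_sequences_alt
    rw [if_neg hbs]
    have hB : (PySem.List.pyRange 0 (bs - 1) 1).foldl
        (fun frontier bi => pvStep matrix bs bi frontier) (pvInit matrix) =
        pvRun matrix bs (bs - 1).toNat 0 (pvInit matrix) := by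
      have h := pvRunB_eq matrix bs (bs - 1).toNat 0 (pvInit matrix)
      rw [show (0 : Int) + (((bs - 1).toNat : Nat) : Int) = bs - 1 by omega] at h
      exact h
    rw [hB]
    rw [PySem.List.foldl_congr_mem
      (g := fun (acc : List (List String) × List (List (Int × Int))) (c : Int) =>
        (acc.1 ++ (pvRun matrix bs (bs - 1).toNat 0
            [(([pvCell matrix 0 c], [(c + 1, 1)], PySem.Set.ofList [(0, c)], 0, c) : PvE)]).map (·.1),
         acc.2 ++ (pvRun matrix bs (bs - 1).toNat 0
            [(([pvCell matrix 0 c], [(c + 1, 1)], PySem.Set.ofList [(0, c)], 0, c) : PvE)]).map (·.2.1)))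
      (h := by intro acc c _; exact hA acc c)]
    rw [PySem.List.foldl_prod_mk
      (f := fun (a : List (List String)) (c : Int) => a ++ (pvRun matrix bs (bs - 1).toNat 0
            [(([pvCell matrix 0 c], [(c + 1, 1)], PySem.Set.ofList [(0, c)], 0, c) : PvE)]).map (·.1))
      (g := fun (a : List (List (Int × Int))) (c : Int) => a ++ (pvRun matrix bs (bs - 1).toNat 0
            [(([pvCell matrix 0 c], [(c + 1, 1)], PySem.Set.ofList [(0, c)], 0, c) : PvE)]).map (·.2.1))]
    rw [PySem.List.foldl_append_eq_flatMap, PySem.List.foldl_append_eq_flatMap]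
    simp only [List.nil_append, ← List.map_flatMap, ← pvRun_flatMap]
    have hinit : (PySem.List.pyRange 0 (pvCols matrix) 1).flatMap
        (fun c => [(([pvCell matrix 0 c], [(c + 1, 1)], PySem.Set.ofList [(0, c)], 0, c) : PvE)]) =
        pvInit matrix := by
      rw [← List.map_eq_flatMap]
      rfl
    rw [hinit]

-- ===== VERDICT (by name: the statement is the Claim_ definition above) =====
theorem all_sequences_spec : Claim_equal_all_sequences := by
  intro matrix buffer_size _ _
  unfold Spec_all_sequences
  exact pv_main matrix buffer_size
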